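-- pv_equiv track=rewrite | github.com/bruadam/hvx | core/analytics/special/occupancy_detector.py | _format_hours
-- ===== SOURCE A (Python) =====
-- def _format_hours(hours: list[int]) -> str:
--     """Format list of hours into readable string."""
--     if not hours:
--         return "none"
--
--     # Group consecutive hours
--     groups = []
--     current_group = [hours[0]]
--
--     for hour in hours[1:]:
--         if hour == current_group[-1] + 1:
--             current_group.append(hour)
--         else:
--             groups.append(current_group)
--             current_group = [hour]
--
--     groups.append(current_group)
--
--     # Format groups
--     formatted = []
--     for group in groups:
--         if len(group) == 1:
--             formatted.append(f"{group[0]:02d}:00")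
--         else:
--             formatted.append(f"{group[0]:02d}:00-{group[-1]:02d}:00")
--
--     return ", ".join(formatted)
-- ===== SOURCE B (Python) =====
-- def _format_hours(hours: list[int]) -> str:
--     """Format list of hours into readable string."""
--     if not hours:
--         return "none"
--     # boundary detection over adjacent pairs: a run starts at b when b does not
--     # extend its predecessor a, and ends at a when b does not extend a
--     starts = [hours[0]] + [b for a, b in zip(hours, hours[1:]) if b != a + 1]
--     ends = [a for a, b in zip(hours, hours[1:]) if b != a + 1] + [hours[-1]]
--     return ", ".join(
--         f"{s:02d}:00" if s == e else f"{s:02d}:00-{e:02d}:00"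
--         for s, e in zip(starts, ends)
--     )
-- ===== Notes on version B (the rewrite author's own statement) =====
-- stated objective: alternative
-- what changed: Replaces A's incremental state machine (a current_group accumulator building a list of group lists, then a formatting pass) with staged boundary detection: run starts and run ends are each read off the adjacent-pair list zip(hours, hours[1:]) by two comprehensions, then zipped into (start, end) pairs and formatted; no running group state exists.
import Mathlib
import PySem

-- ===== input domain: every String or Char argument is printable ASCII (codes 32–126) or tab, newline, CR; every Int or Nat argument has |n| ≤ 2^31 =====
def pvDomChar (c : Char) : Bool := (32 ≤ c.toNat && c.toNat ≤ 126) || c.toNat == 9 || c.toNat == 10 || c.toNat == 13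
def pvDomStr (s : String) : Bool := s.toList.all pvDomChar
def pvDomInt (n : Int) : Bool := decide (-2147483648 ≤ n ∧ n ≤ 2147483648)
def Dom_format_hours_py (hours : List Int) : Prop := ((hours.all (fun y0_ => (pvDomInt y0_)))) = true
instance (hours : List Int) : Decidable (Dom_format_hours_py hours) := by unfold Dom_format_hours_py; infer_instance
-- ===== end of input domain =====

-- B replaces A's incremental group-list state machine by staged boundary detection:
-- run starts/ends are read off adjacent pairs and zipped; objective: alternative, same cost.

-- ===== PORT A =====
-- f"{n:02d}": zero-pad to width 2; only 0..9 gains a pad (a negative n already prints ≥ 2 chars). Exact for width 2.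
def fmt02 (n : Int) : String :=
  if 0 ≤ n ∧ n < 10 then "0" ++ PySem.Int.toStr n else PySem.Int.toStr n

-- the formatting of one group (body of A's second loop); group is always nonempty
def fmtGroup (g : List Int) : String :=
  if g.length == 1 then fmt02 ((PySem.List.pyGet? g 0).getD 0) ++ ":00"
  else fmt02 ((PySem.List.pyGet? g 0).getD 0) ++ ":00-" ++ fmt02 ((PySem.List.pyGet? g (-1)).getD 0) ++ ":00"

def format_hours_py (hours : List Int) : String :=
  match hours with
  | [] => "none"                       -- if not hours: return "none"
  | h0 :: rest =>                      -- current_group = [hours[0]]; loop over hours[1:]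
    let st := rest.foldl (fun (st : List (List Int) × List Int) hour =>
      if hour = (PySem.List.pyGet? st.2 (-1)).getD 0 + 1 then (st.1, st.2 ++ [hour])
      else (st.1 ++ [st.2], [hour])) ([], [h0])
    let groups := st.1 ++ [st.2]       -- groups.append(current_group)
    let formatted := groups.map fmtGroup
    String.intercalate ", " formatted

-- ===== PORT B =====
def format_hours_py_alt (hours : List Int) : String :=
  match hours with
  | [] => "none"
  | _ :: _ =>
    let prs := hours.zip (PySem.List.slice hours (some 1) none)   -- zip(hours, hours[1:])
    let starts := (PySem.List.pyGet? hours 0).getD 0 ::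
      prs.filterMap (fun p => if p.2 = p.1 + 1 then none else some p.2)
    let ends := prs.filterMap (fun p => if p.2 = p.1 + 1 then none else some p.1)
      ++ [(PySem.List.pyGet? hours (-1)).getD 0]
    String.intercalate ", " ((starts.zip ends).map (fun p =>
      if p.1 = p.2 then fmt02 p.1 ++ ":00" else fmt02 p.1 ++ ":00-" ++ fmt02 p.2 ++ ":00"))

-- ===== PRECONDITION & SPEC =====
def Spec_format_hours_py (hours : List Int) (out : String) : Prop := out = format_hours_py_alt hours
instance (hours : List Int) (out : String) : Decidable (Spec_format_hours_py hours out) := by unfold Spec_format_hours_py; infer_instance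

-- ===== CLAIM (what is proved, stated in full; the proofs are below) =====
def Claim_equal_format_hours_py : Prop := ∀ (hours : List Int), Dom_format_hours_py hours → Spec_format_hours_py hours (format_hours_py hours)

-- ===== LEMMAS AND PROOFS =====

-- canonical grouping: A's groups (including the final append), as a recursion on the remaining list
def groupsFrom (cur : List Int) : List Int → List (List Int)
  | [] => [cur]
  | x :: xs =>
    if x = (PySem.List.pyGet? cur (-1)).getD 0 + 1 then groupsFrom (cur ++ [x]) xs
    else cur :: groupsFrom [x] xs

-- the runs as (first, last) pairs, B's view of the same grouping
def runs (first lastc : Int) : List Int → List (Int × Int)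
  | [] => [(first, lastc)]
  | x :: xs => if x = lastc + 1 then runs first x xs else (first, lastc) :: runs x x xs

theorem foldl_groupsFrom (l : List Int) (gs : List (List Int)) (cur : List Int) :
    (l.foldl (fun (st : List (List Int) × List Int) hour =>
      if hour = (PySem.List.pyGet? st.2 (-1)).getD 0 + 1 then (st.1, st.2 ++ [hour])
      else (st.1 ++ [st.2], [hour])) (gs, cur)).1
    ++ [(l.foldl (fun (st : List (List Int) × List Int) hour =>
      if hour = (PySem.List.pyGet? st.2 (-1)).getD 0 + 1 then (st.1, st.2 ++ [hour])
      else (st.1 ++ [st.2], [hour])) (gs, cur)).2]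
    = gs ++ groupsFrom cur l := by
  induction l generalizing gs cur with
  | nil => simp [groupsFrom]
  | cons x xs ih =>
    simp only [List.foldl_cons, groupsFrom]
    by_cases h : x = (PySem.List.pyGet? cur (-1)).getD 0 + 1
    · simp [h, ih]
    · simp [h, ih]

-- B's (first, last) formatting equals A's formatting of the corresponding group
theorem fmtPair_eq (cur : List Int) (first lastc : Int)
    (hh : cur.head? = some first) (hl : cur.getLast? = some lastc)
    (hsing : first = lastc → cur.length = 1) :
    (if first = lastc then fmt02 first ++ ":00"
     else fmt02 first ++ ":00-" ++ fmt02 lastc ++ ":00") = fmtGroup cur := by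
  cases cur with
  | nil => simp at hh
  | cons a t =>
    simp only [List.head?_cons, Option.some.injEq] at hh
    by_cases he : first = lastc
    · have : t = [] := by have := hsing he; simpa using this
      subst this
      simp only [List.getLast?_singleton, Option.some.injEq] at hl
      simp [he, fmtGroup, hh]
    · cases t with
      | nil =>
        exfalso
        simp only [List.getLast?_singleton, Option.some.injEq] at hl
        exact he (hh.symm.trans hl)
      | cons b u =>
        simp only [List.getLast?_cons_cons] at hl
        simp [he, fmtGroup, hh, PySem.List.pyGet?_zero, PySem.List.pyGet?_neg_one, hl]

theorem map_runs_groupsFrom (l : List Int) (cur : List Int) (first lastc : Int)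
    (hh : cur.head? = some first) (hl : cur.getLast? = some lastc)
    (hle : first ≤ lastc) (hsing : first = lastc → cur.length = 1) :
    (runs first lastc l).map (fun p : Int × Int =>
      if p.1 = p.2 then fmt02 p.1 ++ ":00" else fmt02 p.1 ++ ":00-" ++ fmt02 p.2 ++ ":00")
    = (groupsFrom cur l).map fmtGroup := by
  induction l generalizing cur first lastc with
  | nil =>
    simp only [runs, groupsFrom, List.map_cons, List.map_nil]
    rw [fmtPair_eq cur first lastc hh hl hsing]
  | cons x xs ih =>
    have h1 : (PySem.List.pyGet? cur (-1)).getD 0 = lastc := by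
      rw [PySem.List.pyGet?_neg_one, hl]; rfl
    simp only [runs, groupsFrom, h1]
    by_cases hx : x = lastc + 1
    · rw [if_pos hx, if_pos hx]
      exact ih (cur ++ [x]) first x
        (by cases cur with
            | nil => simp at hh
            | cons a t => simp only [List.head?_cons, Option.some.injEq] at hh; simp [hh])
        (by simp)
        (by omega)
        (by intro h; exfalso; omega)
    · rw [if_neg hx, if_neg hx]
      simp only [List.map_cons]
      rw [fmtPair_eq cur first lastc hh hl hsing,
          ih [x] x x rfl rfl le_rfl (fun _ => rfl)]

-- B's zipped start/end lists are exactly the runs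
theorem zip_runs (first c : Int) (l : List Int) :
    ((first :: ((c :: l).zip l).filterMap
        (fun p : Int × Int => if p.2 = p.1 + 1 then none else some p.2)).zip
      (((c :: l).zip l).filterMap
        (fun p : Int × Int => if p.2 = p.1 + 1 then none else some p.1)
        ++ [((c :: l).getLast?).getD 0]))
    = runs first c l := by
  induction l generalizing first c with
  | nil => simp [runs]
  | cons x xs ih =>
    simp only [List.zip_cons_cons, List.filterMap_cons, List.getLast?_cons_cons]
    by_cases hx : x = c + 1
    · simpa [hx, runs] using ih first x
    · simp only [hx, runs, ite_false]
      rw [List.cons_append, List.zip_cons_cons]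
      exact congrArg _ (ih x x)

-- ===== VERDICT (by name: the statement is the Claim_ definition above) =====
theorem format_hours_py_spec : Claim_equal_format_hours_py := by
  intro hours _
  unfold Spec_format_hours_py format_hours_py format_hours_py_alt
  cases hours with
  | nil => rfl
  | cons h0 rest =>
    have hA := foldl_groupsFrom rest [] [h0]
    simp only [List.nil_append] at hA
    simp only [PySem.List.slice_from_one, List.tail_cons, PySem.List.pyGet?_zero,
      List.getElem?_cons_zero, Option.getD_some, PySem.List.pyGet?_neg_one] at hA ⊢
    rw [hA, zip_runs h0 h0 rest,
      map_runs_groupsFrom rest [h0] h0 h0 rfl rfl le_rfl (fun _ => rfl)]
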